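/- GENERATED by mk_final_copies.py from the proof of the farm's unit `vorbis_decode_packet_rest.5c` (farm:vorbis_decode_packet_rest.5c.1: Proof.lean) as the
   re-elaboration sweep compiled it — do not edit. -/
import Asan.CheckWalk
import Vorbis.Spec.Units.vorbis_decode_packet_rest_5c
import Vorbis.Spec.Worked.vorbis_decode_packet_rest_5c_Lemmas

open X86 X86.User Asan Vorbis Vorbis.Spec Vorbis.Spec.vorbis_decode_packet_rest

set_option maxRecDepth 40000
set_option maxHeartbeats 4000000

/-- **Segment .5c of `vorbis_decode_packet_rest`** (0x1111a6 – 0x111260 + 0x11104c – 0x111098, lines 3271 – 3294): from the return of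
`predict_point` (`AtNbPred … i j`) through `val = finalY[j]`, `highroom` / `lowroom` / `room`, the stores into `step2_flag` and
`finalY[j]`, `++j`, to the loop head 0x11109c (`AtNbLoop … i (j + 1)`). The ten paths of the round are walked in FOUR stages
(Lemmas.lean), joined here by `ReachVia.trans` at the three inner cut points 0x1111dd, 0x11123c, 0x111098 with the assertion
`RoundAt` (relative to the state `v` at the cut 0x1111a6):
  * `stage1` 0x1111a6 → 0x1111dd: the load2 check of `finalY[j]` (inside the block at `finalY[i]`: FY1, FL8), the two arms of `room`;
  * `stage2` 0x1111dd → 0x11123c (`val ≠ 0`: three store1 checks, bytes of the own frame object `step2_flag`) or → 0x111098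
    (`val = 0`: one store1 check, `finalY[j] = pred`);
  * `stage3` 0x11123c → 0x111098: the four ways `finalY[j]` is rewritten (no check site);
  * `stage4` 0x111098 → 0x11109c: `add r13d, 1`, the exit assertion by `nb5c_exit` (`Stable.nb_carry` of the tree). -/
theorem Vorbis.Spec.Worked.vorbis_decode_packet_rest_5c_ok : Vorbis.Spec.vorbis_decode_packet_rest_5c.Statement := by
  intro Lay hLay μ hμ u₀ hcode hstore1 hload2
  intro others frames len Ar stored room mode ysz e ret i j v hat
  -- the dwords `[rsp] = low` and `[rsp + 8] = high` are zero-extended bytes (at the addresses the walker asks for)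
  have hlo : v.mem.readLE (e.reg .rsp - 3000) 4 < 256 := by
    have h := hat.slot_low
    simp only [slot32, spOf, addr_norm] at h
    exact h
  have hhi : v.mem.readLE (e.reg .rsp - 2992) 4 < 256 := by
    have h := hat.slot_high
    simp only [slot32, spOf, addr_norm] at h
    exact h
  -- 0x1111a6 → 0x1111dd
  refine (Vorbis.Spec.vorbis_decode_packet_rest_5c.stage1 hLay hμ hcode hload2 hat rfl rfl rfl).trans ?_
  intro a ha
  obtain ⟨hma, sla, sha⟩ := ha
  -- 0x1111dd → 0x11123c ∨ 0x111098
  refine (Vorbis.Spec.vorbis_decode_packet_rest_5c.stage2 hLay hμ hcode hstore1 hat rfl hlo hhi hma sla sha).trans ?_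
  intro b hb
  rcases hb with hmb | hmt
  · -- 0x11123c → 0x111098 → the loop head 0x11109c
    refine (Vorbis.Spec.vorbis_decode_packet_rest_5c.stage3 hLay hμ hcode hat rfl hmb).trans ?_
    intro t hmt
    exact Vorbis.Spec.vorbis_decode_packet_rest_5c.stage4 hLay hcode hat rfl hmt
  · -- 0x111098 → the loop head 0x11109c
    exact Vorbis.Spec.vorbis_decode_packet_rest_5c.stage4 hLay hcode hat rfl hmt
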